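-- pv_equiv track=rewrite | github.com/adematti/cosmopipe1 | cosmopipe/utils.py | txt_to_latex
-- ===== SOURCE A (Python) =====
-- def txt_to_latex(txt):
--     latex = ''
--     txt = list(txt)
--     for c in txt:
--         latex += c
--         if c == '_':
--             latex += '{'
--             txt += '}'
--     return latex
-- ===== SOURCE B (Python) =====
-- def txt_to_latex(txt):
--     return txt.replace('_', '_{') + '}' * txt.count('_')
-- ===== Notes on version B (the rewrite author's own statement) =====
-- stated objective: faster
-- what changed: Replaces A's Python-level loop over a list it mutates while iterating (appending a closing brace per underscore, growing the accumulator one character at a time) with a closed form: one C-level replace of each underscore by underscore-plus-open-brace and a single string multiplication for the closing braces.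
import Mathlib
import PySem

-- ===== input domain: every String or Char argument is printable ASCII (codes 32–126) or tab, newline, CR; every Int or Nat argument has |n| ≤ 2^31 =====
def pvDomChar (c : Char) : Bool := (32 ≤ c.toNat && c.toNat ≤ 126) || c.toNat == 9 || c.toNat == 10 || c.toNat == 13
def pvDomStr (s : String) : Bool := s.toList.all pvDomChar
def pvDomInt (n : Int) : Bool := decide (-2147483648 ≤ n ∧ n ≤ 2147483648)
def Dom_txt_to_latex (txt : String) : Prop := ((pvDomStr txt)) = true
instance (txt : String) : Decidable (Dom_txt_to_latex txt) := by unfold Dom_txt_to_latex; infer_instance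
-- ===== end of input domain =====

-- B replaces A's loop over a list it mutates while iterating (appending '}' per '_')
-- with the closed form replace('_','_{') + '}'*count('_'); objective: idiomatic.

-- ===== PORT A =====
-- A's for-loop over `list(txt)`, which it extends with '}' whenever it sees '_';
-- ported as recursion on the remaining characters (the same growing list), terminating
-- because each appended '}' is not itself '_'.
def latexLoopA (txt : List Char) (latex : List Char) : List Char :=
  match txt with
  | [] => latex
  | c :: rest =>
    if c = '_' then latexLoopA (rest ++ ['}']) (latex ++ ['_', '{'])
    else latexLoopA rest (latex ++ [c])
termination_by txt.length + txt.count '_'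
decreasing_by
  all_goals simp_all [List.count_append]

def txt_to_latex (txt : String) : String := String.ofList (latexLoopA txt.toList [])

-- ===== PORT B =====
-- Source B: txt.replace('_', '_{') + '}' * txt.count('_')
def txt_to_latex_alt (txt : String) : String :=
  PySem.Str.replace txt "_" "_{" ++ String.ofList (List.replicate (PySem.Str.count txt "_") '}')

-- ===== PRECONDITION & SPEC =====
def Spec_txt_to_latex (txt : String) (out : String) : Prop := out = txt_to_latex_alt txt
instance (txt : String) (out : String) : Decidable (Spec_txt_to_latex txt out) := by unfold Spec_txt_to_latex; infer_instance

-- ===== CLAIM (what is proved, stated in full; the proofs are below) =====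
def Claim_equal_txt_to_latex : Prop := ∀ (txt : String), Dom_txt_to_latex txt → Spec_txt_to_latex txt (txt_to_latex txt)

-- ===== LEMMAS AND PROOFS =====

-- What A's rewriting does to each character, as a flatMap.
def pvExpand (l : List Char) : List Char :=
  l.flatMap (fun c => if c = '_' then ['_', '{'] else [c])

theorem pvExpand_append (l m : List Char) : pvExpand (l ++ m) = pvExpand l ++ pvExpand m := by
  simp [pvExpand]

theorem latexLoopA_eq (l acc : List Char) :
    latexLoopA l acc = acc ++ pvExpand l ++ List.replicate (l.count '_') '}' := by
  induction l, acc using latexLoopA.induct with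
  | case1 acc => simp [latexLoopA, pvExpand]
  | case2 acc rest ih =>
      rw [latexLoopA]
      simp only [if_pos rfl, ih, pvExpand_append]
      simp [pvExpand, List.count_append, List.count_cons, List.replicate_succ]
  | case3 acc c rest hc ih =>
      rw [latexLoopA]
      rw [if_neg hc]
      simp [ih, pvExpand, List.count_cons, hc]

-- Chars.replace with the one-character pattern '_' is exactly pvExpand.
theorem replace_go_underscore (l acc : List Char) (fuel : Nat) (hf : l.length ≤ fuel) :
    PySem.Chars.replace.go ['_'] ['_', '{'] fuel l acc = acc.reverse ++ pvExpand l := by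
  induction l generalizing acc fuel with
  | nil => cases fuel <;> simp [PySem.Chars.replace.go, pvExpand]
  | cons c rest ih =>
      cases fuel with
      | zero => simp at hf
      | succ n =>
          rw [PySem.Chars.replace.go]
          by_cases hc : c = '_'
          · subst hc
            simp only [List.isPrefixOf, BEq.rfl, Bool.true_and, if_pos, List.length_cons,
              List.length_nil, List.drop_succ_cons, List.drop_zero]
            rw [ih _ _ (by simpa using Nat.le_of_succ_le_succ hf)]
            simp [pvExpand]
          · have hp : (List.isPrefixOf ['_'] (c :: rest)) = false := by
              simp [List.isPrefixOf]
              exact fun h => hc h.symm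
            rw [if_neg (by simp [hp])]
            rw [ih _ _ (by simpa using Nat.le_of_succ_le_succ hf)]
            simp [pvExpand, hc]

theorem chars_replace_underscore (l : List Char) :
    PySem.Chars.replace l ['_'] ['_', '{'] = pvExpand l := by
  have h := replace_go_underscore l [] l.length le_rfl
  simpa [PySem.Chars.replace] using h

-- Chars.count with the one-character pattern '_' is List.count.
theorem count_go_underscore (l : List Char) (acc : Nat) (fuel : Nat) (hf : l.length ≤ fuel) :
    PySem.Chars.count.go ['_'] fuel l acc = acc + l.count '_' := by
  induction l generalizing acc fuel with
  | nil => cases fuel <;> simp [PySem.Chars.count.go]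
  | cons c rest ih =>
      cases fuel with
      | zero => simp at hf
      | succ n =>
          rw [PySem.Chars.count.go]
          by_cases hc : c = '_'
          · subst hc
            simp only [List.isPrefixOf, BEq.rfl, Bool.true_and, if_pos, List.length_cons,
              List.length_nil, List.drop_succ_cons, List.drop_zero]
            rw [ih _ _ (by simpa using Nat.le_of_succ_le_succ hf)]
            simp [List.count_cons]
            omega
          · have hp : (List.isPrefixOf ['_'] (c :: rest)) = false := by
              simp [List.isPrefixOf]
              exact fun h => hc h.symm
            rw [if_neg (by simp [hp])]
            rw [ih _ _ (by simpa using Nat.le_of_succ_le_succ hf)]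
            simp [List.count_cons, hc]

theorem chars_count_underscore (l : List Char) :
    PySem.Chars.count l ['_'] = l.count '_' := by
  have h := count_go_underscore l 0 l.length le_rfl
  simpa [PySem.Chars.count] using h

-- ===== VERDICT (by name: the statement is the Claim_ definition above) =====
theorem txt_to_latex_spec : Claim_equal_txt_to_latex := by
  intro txt _
  unfold Spec_txt_to_latex txt_to_latex txt_to_latex_alt
  have hu : ("_" : String).toList = ['_'] := by decide
  have hu2 : ("_{" : String).toList = ['_', '{'] := by decide
  refine String.toList_inj.mp ?_
  simp only [String.toList_append, String.toList_ofList, PySem.Str.toList_replace,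
    PySem.Str.count_eq, hu, hu2, chars_replace_underscore, chars_count_underscore]
  rw [latexLoopA_eq]
  simp
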